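-- pv_equiv track=rewrite | github.com/Mattbusel/srfm-lab | aeternus/tensor_net/tensor_net/kernel_fusion.py | detect_fusable_ops
-- ===== SOURCE A (Python) =====
-- from typing import Any, Callable, Dict, List, Optional, Sequence, Tuple, Union
--
-- def detect_fusable_ops(
--     computation_graph: List[str],
-- ) -> List[List[int]]:
--     """Detect which operations in a computation graph can be fused.
--
--     Simple pattern matching for common fusable patterns in TT computations.
--
--     Args:
--         computation_graph: List of operation names (e.g., ["einsum", "reshape", "einsum"]).
--
--     Returns:
--         List of groups of indices that can be fused together.
--     """
--     fusable_groups = []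
--     current_group = []
--
--     fusable_ops = {"einsum", "matmul", "dot", "tensordot", "reshape"}
--
--     for i, op in enumerate(computation_graph):
--         if op.lower() in fusable_ops:
--             current_group.append(i)
--         else:
--             if len(current_group) > 1:
--                 fusable_groups.append(current_group)
--             elif current_group:
--                 pass
--             current_group = []
--
--     if len(current_group) > 1:
--         fusable_groups.append(current_group)
--
--     return fusable_groups
-- ===== SOURCE B (Python) =====
-- def detect_fusable_ops(
--     computation_graph,
-- ):
--     """Boundary-scan formulation: mark fusable positions, locate run starts and run
--     ends independently by comparing each position with its neighbour, pair them up,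
--     and emit the index ranges of runs longer than one."""
--     fusable_ops = {"einsum", "matmul", "dot", "tensordot", "reshape"}
--     mask = [op.lower() in fusable_ops for op in computation_graph]
--     n = len(mask)
--     starts = [i for i in range(n) if mask[i] and (i == 0 or not mask[i - 1])]
--     ends = [i for i in range(n) if mask[i] and (i == n - 1 or not mask[i + 1])]
--     return [list(range(s, e + 1)) for s, e in zip(starts, ends) if e > s]
-- ===== Notes on version B (the rewrite author's own statement) =====
-- stated objective: alternative
-- what changed: Replaces the single-pass accumulator/flush scan with a boundary-detection formulation: build a fusable mask, independently collect run-start and run-end indices by neighbour comparison, zip them into (start,end) pairs and emit ranges of length > 1.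
import Mathlib
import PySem

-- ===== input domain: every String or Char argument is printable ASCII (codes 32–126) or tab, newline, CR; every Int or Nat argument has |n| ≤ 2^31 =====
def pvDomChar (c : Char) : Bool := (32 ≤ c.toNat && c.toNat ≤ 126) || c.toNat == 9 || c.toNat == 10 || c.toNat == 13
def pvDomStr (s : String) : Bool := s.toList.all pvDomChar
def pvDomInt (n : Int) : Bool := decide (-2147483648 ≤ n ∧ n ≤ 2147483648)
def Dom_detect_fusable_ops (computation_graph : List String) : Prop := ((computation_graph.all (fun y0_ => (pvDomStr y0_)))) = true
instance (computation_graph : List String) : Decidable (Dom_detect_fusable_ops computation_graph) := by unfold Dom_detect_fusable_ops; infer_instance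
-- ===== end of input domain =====

-- B replaces A's accumulator/flush scan by boundary detection: collect run starts and run ends
-- separately by neighbour comparison, zip them into pairs, emit the ranges of length > 1 (alternative; same cost).

-- ===== PORT A =====
-- the set literal {"einsum", "matmul", "dot", "tensordot", "reshape"}
def pvFusableOps : PySem.Set String :=
  PySem.Set.ofList ["einsum", "matmul", "dot", "tensordot", "reshape"]

-- op.lower() in fusable_ops
def pvIsFusable (op : String) : Bool := PySem.Str.lower op ∈ pvFusableOps

def detect_fusable_ops (computation_graph : List String) : List (List Int) :=
  let st :=
    (PySem.List.enumerate computation_graph).foldl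
      (fun (st : List (List Int) × List Int) (p : Int × String) =>
        if pvIsFusable p.2 then
          (st.1, st.2 ++ [p.1])
        else
          ((if st.2.length > 1 then st.1 ++ [st.2] else st.1), []))
      ([], [])
  if st.2.length > 1 then st.1 ++ [st.2] else st.1

-- ===== PORT B =====
-- Nat → Int cast for the produced indices (python ints)
def pvN2Z (i : Nat) : Int := (i : Int)
-- mask = [op.lower() in fusable_ops for op in g]; starts/ends by neighbour comparison over range(n);
-- Nat indices are exact here: range(n) yields 0..n-1, and out-of-range neighbour reads are short-circuited
-- in Python exactly where getD's default is irrelevant (i == 0, i == n-1 guards).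
def detect_fusable_ops_alt (computation_graph : List String) : List (List Int) :=
  let mask := computation_graph.map pvIsFusable
  let n := mask.length
  let starts := (List.range n).filter (fun i => mask.getD i false && (i == 0 || !(mask.getD (i - 1) false)))
  let ends := (List.range n).filter (fun i => mask.getD i false && (i == n - 1 || !(mask.getD (i + 1) false)))
  ((starts.zip ends).filter (fun p => p.2 > p.1)).map
    (fun p => (List.range' p.1 (p.2 + 1 - p.1)).map pvN2Z)

-- ===== PRECONDITION & SPEC =====
def Spec_detect_fusable_ops (computation_graph : List String) (out : List (List Int)) : Prop := out = detect_fusable_ops_alt computation_graph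
instance (computation_graph : List String) (out : List (List Int)) : Decidable (Spec_detect_fusable_ops computation_graph out) := by unfold Spec_detect_fusable_ops; infer_instance

-- ===== CLAIM (what is proved, stated in full; the proofs are below) =====
def Claim_equal_detect_fusable_ops : Prop := ∀ (computation_graph : List String), Dom_detect_fusable_ops computation_graph → Spec_detect_fusable_ops computation_graph (detect_fusable_ops computation_graph)

-- ===== LEMMAS AND PROOFS =====

-- A's loop body restructured as a recursion over the remaining enumerated list and the current group
def pvOut : List (Int × String) → List Int → List (List Int)
  | [], cur => if cur.length > 1 then [cur] else []
  | (i, s) :: rest, cur =>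
    if pvIsFusable s then pvOut rest (cur ++ [i])
    else (if cur.length > 1 then [cur] else []) ++ pvOut rest []

lemma pvFoldA_eq_out (l : List (Int × String)) (groups : List (List Int)) (cur : List Int) :
    (let st := l.foldl
      (fun (st : List (List Int) × List Int) (p : Int × String) =>
        if pvIsFusable p.2 then (st.1, st.2 ++ [p.1])
        else ((if st.2.length > 1 then st.1 ++ [st.2] else st.1), []))
      (groups, cur)
     if st.2.length > 1 then st.1 ++ [st.2] else st.1)
    = groups ++ pvOut l cur := by
  induction l generalizing groups cur with
  | nil => simp [pvOut]; split <;> simp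
  | cons p rest ih =>
    obtain ⟨i, s⟩ := p
    by_cases h : pvIsFusable s
    · simpa [pvOut, h] using ih groups (cur ++ [i])
    · simp only [List.foldl_cons, h, Bool.false_eq_true, if_false, pvOut]
      rw [ih]
      split <;> simp

-- the same scan over the boolean mask, with a Nat position counter
def pvOutM (k : Nat) (cur : List Nat) : List Bool → List (List Nat)
  | [] => if cur.length > 1 then [cur] else []
  | b :: t =>
    if b then pvOutM (k + 1) (cur ++ [k]) t
    else (if cur.length > 1 then [cur] else []) ++ pvOutM (k + 1) [] t

lemma pvOut_eq_outM (g : List String) (k : Nat) (cur : List Nat) :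
    pvOut (PySem.List.enumerate g (k : Int)) (cur.map pvN2Z)
      = (pvOutM k cur (g.map pvIsFusable)).map (List.map pvN2Z) := by
  induction g generalizing k cur with
  | nil =>
    simp only [PySem.List.enumerate_nil, pvOut, List.map_nil, pvOutM]
    split <;> simp_all
  | cons s g' ih =>
    rw [PySem.List.enumerate_cons]
    by_cases h : pvIsFusable s
    · have : ((k : Int) + 1) = ((k + 1 : Nat) : Int) := by push_cast; ring
      simp only [pvOut, h, if_pos, List.map_cons, pvOutM, this]
      have hc : cur.map pvN2Z ++ [(k : Int)] = (cur ++ [k]).map pvN2Z := by simp [pvN2Z]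
      rw [hc, ih]
    · have : ((k : Int) + 1) = ((k + 1 : Nat) : Int) := by push_cast; ring
      simp only [pvOut, h, Bool.false_eq_true, if_false, List.map_cons, pvOutM, this]
      have h0 : ([] : List Int) = ([] : List Nat).map pvN2Z := by simp
      rw [h0, ih]
      split <;> simp_all

-- run-start positions: fusable here and previous position not fusable (prev threads the neighbour)
def pvStartsF (k : Nat) (prev : Bool) : List Bool → List Nat
  | [] => []
  | b :: t => (if b && !prev then [k] else []) ++ pvStartsF (k + 1) b t

-- run-end positions: fusable here and next position not fusable (lookahead at the tail's head)
def pvEndsF (k : Nat) : List Bool → List Nat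
  | [] => []
  | b :: t => (if b && !(t.headD false) then [k] else []) ++ pvEndsF (k + 1) t

lemma pvStartsF_spec (m : List Bool) (prev : Bool) (k : Nat) :
    pvStartsF k prev m
      = ((List.range m.length).filter
          (fun i => m.getD i false && (if i = 0 then !prev else !(m.getD (i - 1) false)))).map (· + k) := by
  induction m generalizing prev k with
  | nil => simp [pvStartsF]
  | cons b t ih =>
    rw [pvStartsF, List.length_cons, List.range_succ_eq_map, List.filter_cons, List.filter_map]
    have hpred : ((fun i => (b :: t).getD i false &&
        (if i = 0 then !prev else !((b :: t).getD (i - 1) false))) ∘ Nat.succ)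
        = (fun i => t.getD i false && (if i = 0 then !b else !(t.getD (i - 1) false))) := by
      funext i
      cases i <;> simp [List.getD]
    rw [hpred, ih b (k + 1)]
    have hmm : ∀ l : List Nat, (l.map Nat.succ).map (· + k) = l.map (· + (k + 1)) := by
      intro l; rw [List.map_map]; apply List.map_congr_left; intro i _
      simp [Nat.succ_eq_add_one]; omega
    simp only [List.getD, List.getElem?_cons_zero, Option.getD_some, if_pos]
    by_cases hb : (b && !prev) = true <;> simp [hb, hmm]

lemma pvEndsF_spec (m : List Bool) (k : Nat) :
    pvEndsF k m
      = ((List.range m.length).filter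
          (fun i => m.getD i false && !(m.getD (i + 1) false))).map (· + k) := by
  induction m generalizing k with
  | nil => simp [pvEndsF]
  | cons b t ih =>
    rw [pvEndsF, List.length_cons, List.range_succ_eq_map, List.filter_cons, List.filter_map]
    have hpred : ((fun i => (b :: t).getD i false && !((b :: t).getD (i + 1) false)) ∘ Nat.succ)
        = (fun i => t.getD i false && !(t.getD (i + 1) false)) := by
      funext i
      simp [List.getD]
    rw [hpred, ih (k + 1)]
    have hmm : ∀ l : List Nat, (l.map Nat.succ).map (· + k) = l.map (· + (k + 1)) := by
      intro l; rw [List.map_map]; apply List.map_congr_left; intro i _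
      simp [Nat.succ_eq_add_one]; omega
    have hhead : t.headD false = t.getD 0 false := by cases t <;> simp [List.getD]
    rw [hhead]
    simp only [List.getD, List.getElem?_cons_zero, Option.getD_some, List.getElem?_cons_succ,
      Nat.zero_add]
    by_cases hb : (b && !(t[0]?.getD false)) = true <;> simp [hb, hmm]

-- the central correspondence: the mask scan equals zip-of-boundaries, in closed-run and open-run form
lemma pvMain (t : List Bool) :
    (∀ k, pvOutM k [] t
        = (((pvStartsF k false t).zip (pvEndsF k t)).filter (fun p => p.2 > p.1)).map
            (fun p => List.range' p.1 (p.2 + 1 - p.1)))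
    ∧ (∀ k s, s ≤ k → pvOutM (k + 1) (List.range' s (k + 1 - s)) t
        = (((s :: pvStartsF (k + 1) true t).zip
              ((if !(t.headD false) then [k] else []) ++ pvEndsF (k + 1) t)).filter
            (fun p => p.2 > p.1)).map (fun p => List.range' p.1 (p.2 + 1 - p.1))) := by
  induction t with
  | nil =>
    constructor
    · intro k; simp [pvOutM, pvStartsF, pvEndsF]
    · intro k s hs
      have hlen : (List.range' s (k + 1 - s)).length = k + 1 - s := List.length_range'
      by_cases h : 1 < k + 1 - s
      · have hks : s < k := by omega
        simp [pvOutM, pvStartsF, pvEndsF, hlen, h, hks]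
      · have hks : ¬ (s < k) := by omega
        simp [pvOutM, pvStartsF, pvEndsF, hlen, h, hks]
  | cons b t' ih =>
    constructor
    · intro k
      cases hb : b
      · simp only [pvOutM, Bool.false_eq_true, if_false, List.length_nil, pvStartsF, pvEndsF,
          Bool.false_and]
        simpa using ih.1 (k + 1)
      · have h1 : ([] : List Nat) ++ [k] = List.range' k (k + 1 - k) := by simp
        simp only [pvOutM, if_pos, h1, pvStartsF, pvEndsF, Bool.true_and, Bool.not_false]
        simpa using ih.2 k k le_rfl
    · intro k s hs
      cases hb : b
      · have hlen : (List.range' s (k + 1 - s)).length = k + 1 - s := List.length_range'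
        simp only [pvOutM, Bool.false_eq_true, if_false, hlen, pvStartsF, pvEndsF,
          Bool.false_and, List.headD_cons, Bool.not_false, if_true,
          List.nil_append, List.singleton_append, List.zip_cons_cons, List.filter_cons]
        rw [ih.1 (k + 2)]
        by_cases h : 1 < k + 1 - s
        · have hks : s < k := by omega
          simp [h, hks]
        · have hks : ¬ (s < k) := by omega
          simp [h, hks]
      · have h1 : List.range' s (k + 1 - s) ++ [k + 1] = List.range' s (k + 2 - s) := by
          have h2 : k + 2 - s = (k + 1 - s) + 1 := by omega
          rw [h2, List.range'_concat]
          congr 2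
          omega
        simp only [pvOutM, if_pos, h1, pvStartsF, pvEndsF, Bool.true_and, Bool.not_true,
          List.headD_cons]
        simpa using ih.2 (k + 1) s (by omega)

-- bridging the port's filter predicates to the prev/lookahead forms
lemma pvStarts_port (m : List Bool) :
    (List.range m.length).filter (fun i => m.getD i false && (i == 0 || !(m.getD (i - 1) false)))
      = pvStartsF 0 false m := by
  rw [pvStartsF_spec]
  have : ((· + 0) : Nat → Nat) = id := by funext i; simp
  rw [this, List.map_id]
  apply List.filter_congr
  intro i _
  cases i <;> simp

lemma pvEnds_port (m : List Bool) :
    (List.range m.length).filter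
        (fun i => m.getD i false && (i == m.length - 1 || !(m.getD (i + 1) false)))
      = pvEndsF 0 m := by
  rw [pvEndsF_spec]
  have h0 : ((· + 0) : Nat → Nat) = id := by funext i; simp
  rw [h0, List.map_id]
  apply List.filter_congr
  intro i hi
  by_cases h : i = m.length - 1
  · have hlen : m.length ≤ i + 1 := by
      have := List.mem_range.mp hi
      omega
    have hnone : m[i + 1]? = none := List.getElem?_eq_none hlen
    simp [List.getD, hnone]
  · simp [List.getD, show (i == m.length - 1) = false by simpa using h]

-- ===== VERDICT (by name: the statement is the Claim_ definition above) =====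
theorem detect_fusable_ops_spec : Claim_equal_detect_fusable_ops := by
  intro g _
  unfold Spec_detect_fusable_ops detect_fusable_ops detect_fusable_ops_alt
  rw [pvFoldA_eq_out (PySem.List.enumerate g) [] []]
  have he : PySem.List.enumerate g = PySem.List.enumerate g ((0 : Nat) : Int) := by norm_num
  have h0 : ([] : List Int) = ([] : List Nat).map pvN2Z := by simp
  rw [he, h0, pvOut_eq_outM g 0 [], (pvMain (g.map pvIsFusable)).1 0]
  rw [List.nil_append]
  simp only [← pvStarts_port, ← pvEnds_port, List.map_map, Function.comp_def]
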